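-- pv_equiv track=rewrite | github.com/Enjef/Algo | 2100 - 2199/2144 - Minimum Cost of Buying Candies With Discount/2144 - Minimum Cost of Buying Candies With Discount.py | minimumCost_best_memory
-- ===== SOURCE A (Python) =====
-- from typing import List
--
-- def minimumCost_best_memory(cost: List[int]) -> int:
--     cost.sort()
--     pos = len(cost)
--     if pos < 2:
--         return sum(cost)
--     max_cost = 0
--     while pos >= 0:
--         max_cost += sum(cost[pos-2:pos]) if pos > 1 else sum(cost[:pos])
--         pos -= 3
--     return max_cost
-- ===== SOURCE B (Python) =====
-- from typing import List
--
-- def minimumCost_best_memory(cost: List[int]) -> int: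
--     cost.sort()
--     n = len(cost)
--     return sum(c for j, c in enumerate(cost) if (n - 1 - j) % 3 != 2)
-- ===== Notes on version B (the rewrite author's own statement) =====
-- stated objective: idiomatic
-- what changed: Replaces the backwards stride-3 while loop summing 2-element slices with a single forward comprehension that keeps every element whose rank from the top is not 2 mod 3.
import Mathlib
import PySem

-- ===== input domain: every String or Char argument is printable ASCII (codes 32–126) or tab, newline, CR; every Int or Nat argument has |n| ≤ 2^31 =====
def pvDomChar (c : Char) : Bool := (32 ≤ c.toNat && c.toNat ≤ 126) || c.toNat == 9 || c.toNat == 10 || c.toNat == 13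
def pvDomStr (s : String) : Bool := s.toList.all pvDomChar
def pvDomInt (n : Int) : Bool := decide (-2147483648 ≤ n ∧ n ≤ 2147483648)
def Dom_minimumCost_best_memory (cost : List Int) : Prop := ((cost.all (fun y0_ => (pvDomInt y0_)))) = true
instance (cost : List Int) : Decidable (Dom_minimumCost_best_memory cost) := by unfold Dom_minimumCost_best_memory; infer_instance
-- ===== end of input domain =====

-- B replaces A's backwards stride-3 while loop (summing 2-element slices) by one forward
-- comprehension keeping each element whose rank from the top is not 2 mod 3 (objective: idiomatic).
-- Both A and B sort the argument in place; the equivalence proved is about the RETURN value.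

-- ===== PORT A =====
-- while pos >= 0: max_cost += sum(cost[pos-2:pos]) if pos > 1 else sum(cost[:pos]); pos -= 3
def pvLoopA (s : List Int) (pos : Int) : Int :=
  if _h : pos ≥ 0 then
    (if pos > 1 then (PySem.List.slice s (some (pos - 2)) (some pos)).sum
     else (PySem.List.slice s none (some pos)).sum) + pvLoopA s (pos - 3)
  else 0
termination_by (pos + 3).toNat
decreasing_by omega

def minimumCost_best_memory (cost : List Int) : Int :=
  let s := PySem.List.sorted cost (fun x => x) false
  if (s.length : Int) < 2 then s.sum
  else pvLoopA s (s.length : Int)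

-- ===== PORT B =====
def minimumCost_best_memory_alt (cost : List Int) : Int :=
  let s := PySem.List.sorted cost (fun x => x) false
  let n : Int := s.length
  (((PySem.List.enumerate s 0).filter
      (fun p => decide (PySem.Int.mod (n - 1 - p.1) 3 ≠ 2))).map Prod.snd).sum

-- ===== PRECONDITION & SPEC =====
def Spec_minimumCost_best_memory (cost : List Int) (out : Int) : Prop := out = minimumCost_best_memory_alt cost
instance (cost : List Int) (out : Int) : Decidable (Spec_minimumCost_best_memory cost out) := by unfold Spec_minimumCost_best_memory; infer_instance

-- ===== CLAIM (what is proved, stated in full; the proofs are below) =====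
def Claim_equal_minimumCost_best_memory : Prop := ∀ (cost : List Int), Dom_minimumCost_best_memory cost → Spec_minimumCost_best_memory cost (minimumCost_best_memory cost)

-- ===== LEMMAS AND PROOFS =====

-- keep the two most expensive of each group of three, counted from the top
def pvG : List Int → Int
  | [] => 0
  | [a] => a
  | [a, b] => a + b
  | a :: b :: _ :: r => a + b + pvG r

-- conditional sum with an index-dependent predicate (proof-side view of B's comprehension)
def pvS : List Int → (Int → Bool) → Int
  | [], _ => 0
  | a :: t, f => (if f 0 then a else 0) + pvS t (fun j => f (j + 1))

theorem pvS_congr (l : List Int) (f g : Int → Bool) (h : ∀ j, f j = g j) :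
    pvS l f = pvS l g := by
  induction l generalizing f g with
  | nil => rfl
  | cons a t ih => simp [pvS, h 0, ih (fun j => f (j+1)) (fun j => g (j+1)) (fun j => h (j+1))]

theorem pvS_append_singleton (t : List Int) (a : Int) (f : Int → Bool) :
    pvS (t ++ [a]) f = pvS t f + (if f (t.length : Int) then a else 0) := by
  induction t generalizing f with
  | nil => simp [pvS]
  | cons b u ih =>
      simp only [List.cons_append, pvS, ih, List.length_cons]
      push_cast
      ring

theorem sum_enum_eq_pvS (l : List Int) (k : Int) (f : Int → Bool) :
    (((PySem.List.enumerate l k).filter (fun p => f p.1)).map Prod.snd).sum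
      = pvS l (fun j => f (j + k)) := by
  induction l generalizing k with
  | nil => simp [PySem.List.enumerate_nil, pvS]
  | cons a t ih =>
      rw [PySem.List.enumerate_cons]
      simp only [List.filter_cons, pvS, zero_add]
      have hc : pvS t (fun j => f (j + (k + 1))) = pvS t (fun j => f (j + 1 + k)) :=
        pvS_congr t _ _ (by intro j; ring_nf)
      by_cases h : f k <;> simp [h, ih (k + 1), hc]

theorem pvS_rev (s : List Int) (f : Int → Bool) :
    pvS s (fun j => f ((s.length : Int) - 1 - j)) = pvS s.reverse f := by
  induction s generalizing f with
  | nil => rfl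
  | cons a t ih =>
      rw [List.reverse_cons, pvS_append_singleton, ← ih]
      simp only [pvS, List.length_cons, List.length_reverse]
      push_cast
      have h0 : ((t.length : Int) + 1 - 1 - 0) = (t.length : Int) := by ring
      rw [pvS_congr t (fun j => f ((t.length : Int) + 1 - 1 - (j + 1)))
            (fun j => f ((t.length : Int) - 1 - j)) (by intro j; ring_nf)]
      rw [h0]
      omega

def pvP3 : Int → Bool := fun j => decide (PySem.Int.mod j 3 ≠ 2)

theorem pvMod3_shift (j : Int) : PySem.Int.mod (j + 3) 3 = PySem.Int.mod j 3 := by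
  rw [PySem.Int.mod_eq_emod_of_pos (by norm_num : (0:Int) < 3),
      PySem.Int.mod_eq_emod_of_pos (by norm_num : (0:Int) < 3)]
  omega

theorem pvS_p3_eq_g (l : List Int) : pvS l pvP3 = pvG l := by
  induction l using pvG.induct with
  | case1 => rfl
  | case2 a => simp [pvS, pvG, pvP3, PySem.Int.mod]
  | case3 a b => simp [pvS, pvG, pvP3, PySem.Int.mod]
  | case4 a b c r ih =>
      simp only [pvS, pvG]
      rw [pvS_congr r (fun j => pvP3 (j + 1 + 1 + 1)) pvP3
            (by intro j
                simp only [pvP3]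
                rw [show j + 1 + 1 + 1 = j + 3 by ring, pvMod3_shift])]
      rw [ih]
      have h0 : pvP3 0 = true := by decide
      have h1 : pvP3 1 = true := by decide
      have h2 : pvP3 2 = false := by decide
      simp [h0, h1, h2, add_assoc]

-- B computed on a list s equals pvG s.reverse
theorem alt_eq_g (s : List Int) :
    (((PySem.List.enumerate s 0).filter
        (fun p => decide (PySem.Int.mod ((s.length : Int) - 1 - p.1) 3 ≠ 2))).map Prod.snd).sum
      = pvG s.reverse := by
  rw [sum_enum_eq_pvS s 0 (fun j => decide (PySem.Int.mod ((s.length : Int) - 1 - j) 3 ≠ 2))]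
  rw [pvS_congr s _ (fun j => pvP3 ((s.length : Int) - 1 - j)) (by intro j; simp [pvP3])]
  rw [pvS_rev s pvP3, pvS_p3_eq_g]

-- pvLoopA only looks below pos: appending elements past pos does not change it
theorem pvLoopA_neg (s : List Int) (pos : Int) (h : pos < 0) : pvLoopA s pos = 0 := by
  rw [pvLoopA]
  simp [show ¬ pos ≥ 0 by omega]

theorem pvLoopA_append_aux : ∀ (n : ℕ) (u ext : List Int) (pos : Int),
    (pos + 3).toNat ≤ n → pos ≤ (u.length : Int) →
    pvLoopA (u ++ ext) pos = pvLoopA u pos := by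
  intro n
  induction n with
  | zero => intro u ext pos hn _; rw [pvLoopA_neg _ _ (by omega), pvLoopA_neg _ _ (by omega)]
  | succ m ih =>
      intro u ext pos hn hle
      by_cases h : pos ≥ 0
      · conv_lhs => rw [pvLoopA]
        conv_rhs => rw [pvLoopA]
        simp only [h, dif_pos]
        have hrec : pvLoopA (u ++ ext) (pos - 3) = pvLoopA u (pos - 3) :=
          ih u ext (pos - 3) (by omega) (by omega)
        rw [hrec]
        congr 1
        by_cases h2 : pos > 1
        · simp only [h2, if_pos]
          rw [PySem.List.slice_toNat _ (by omega : (0:Int) ≤ pos - 2) (by omega : (0:Int) ≤ pos),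
              PySem.List.slice_toNat _ (by omega : (0:Int) ≤ pos - 2) (by omega : (0:Int) ≤ pos)]
          rw [List.drop_append]
          rw [List.take_append_of_le_length (by simp; omega)]
        · simp only [h2, if_false]
          rw [PySem.List.slice_to _ h, PySem.List.slice_to _ h]
          rw [List.take_append_of_le_length (by omega)]
      · rw [pvLoopA_neg _ _ (by omega), pvLoopA_neg _ _ (by omega)]

theorem pvLoopA_append (u ext : List Int) (pos : Int) (hle : pos ≤ (u.length : Int)) :
    pvLoopA (u ++ ext) pos = pvLoopA u pos :=
  pvLoopA_append_aux (pos + 3).toNat u ext pos le_rfl hle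

theorem pvLoopA_eq_g (t : List Int) : pvLoopA t.reverse (t.length : Int) = pvG t := by
  induction t using pvG.induct with
  | case1 => rw [pvLoopA]; simp [pvLoopA_neg _ _ (by norm_num : (-3:Int) < 0), PySem.List.slice, pvG]
  | case2 a =>
      rw [pvLoopA]
      norm_num
      rw [PySem.List.slice_to _ (by norm_num : (0:Int) ≤ 1)]
      rw [pvLoopA_neg _ _ (by norm_num)]
      simp [pvG]
  | case3 a b =>
      rw [pvLoopA]
      norm_num
      rw [pvLoopA_neg _ _ (by norm_num), PySem.List.slice_to _ (by norm_num : (0:Int) ≤ 2)]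
      simp [pvG]
      ring
  | case4 a b c r ih =>
      have hs : (a :: b :: c :: r).reverse = r.reverse ++ [c, b, a] := by
        simp
      have hlen : ((a :: b :: c :: r).length : Int) = (r.length : Int) + 3 := by
        simp; ring
      rw [hs, hlen, pvLoopA]
      have hge : ((r.length : Int) + 3) ≥ 0 := by omega
      have hgt : ((r.length : Int) + 3) > 1 := by omega
      simp only [hge, dif_pos, hgt, if_pos]
      have hslice : PySem.List.slice (r.reverse ++ [c, b, a])
          (some ((r.length : Int) + 3 - 2)) (some ((r.length : Int) + 3)) = [b, a] := by
        rw [show ((r.length : Int) + 3 - 2) = ((r.length + 1 : ℕ) : Int) by push_cast; ring,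
            show ((r.length : Int) + 3) = ((r.length + 3 : ℕ) : Int) by push_cast; ring,
            PySem.List.slice_natCast]
        rw [show r.length + 1 = r.reverse.length + 1 by simp,
            List.drop_length_add_append]
        simp
      rw [hslice]
      have hrec : pvLoopA (r.reverse ++ [c, b, a]) ((r.length : Int) + 3 - 3)
          = pvLoopA r.reverse (r.length : Int) := by
        rw [show ((r.length : Int) + 3 - 3) = (r.length : Int) by ring]
        exact pvLoopA_append r.reverse [c, b, a] _ (by simp)
      rw [hrec, ih, pvG]
      simp
      ring

theorem pvA_eq_g (s : List Int) :
    (if (s.length : Int) < 2 then s.sum else pvLoopA s (s.length : Int)) = pvG s.reverse := by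
  split_ifs with h
  · match s, h with
    | [], _ => simp [pvG]
    | [x], _ => simp [pvG]
    | x :: y :: t, h => exfalso; simp at h; omega
  · have := pvLoopA_eq_g s.reverse
    simpa using this

-- ===== VERDICT (by name: the statement is the Claim_ definition above) =====
theorem minimumCost_best_memory_spec : Claim_equal_minimumCost_best_memory := by
  intro cost _
  show minimumCost_best_memory cost = minimumCost_best_memory_alt cost
  exact (pvA_eq_g (PySem.List.sorted cost (fun x => x) false)).trans
    (alt_eq_g (PySem.List.sorted cost (fun x => x) false)).symm
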